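-- pv_equiv track=rewrite | github.com/boomoioi/OOD | chapter9/anydrome.py | anydrome
-- ===== SOURCE A (Python) =====
-- def anydrome(st):
--     ascend = False
--     decend = False
--     dup = 0
--     seen = set()
--     seen.add(st[0])
--     for i in range(1, len(st)):
--         if st[i] > st[i-1]:
--             ascend = True
--         if st[i] < st[i-1]:
--             decend = True
--         if st[i] in seen:
--             dup +=1
--         seen.add(st[i])
--     if ascend and decend:
--         return "Nondrome"
--     elif dup == len(st)-1:
--         return "Repdrome"
--     elif ascend and not dup:
--         return "Metadrome"
--     elif ascend and dup:
--         return "Plaindrome"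
--     elif decend and not dup:
--         return "Katadrome"
--     elif decend and dup:
--         return "Nialpdrome"
-- ===== SOURCE B (Python) =====
-- def anydrome(st):
--     L = list(st)
--     S = sorted(L)
--     if S[0] == S[-1]:
--         return "Repdrome"
--     nodup = all(x < y for x, y in zip(S, S[1:]))
--     if L == S:
--         return "Metadrome" if nodup else "Plaindrome"
--     if L == S[::-1]:
--         return "Katadrome" if nodup else "Nialpdrome"
--     return "Nondrome"
-- ===== Notes on version B (the rewrite author's own statement) =====
-- stated objective: alternative
-- what changed: A's single stateful index loop with ascend/decend flags, a seen-set and a duplicate counter is replaced by a sort-based classifier: B sorts the string once and classifies by comparing the original with the sorted list and its reversal (monotone directions) and by strict adjacency in the sorted list (distinctness), with all-equal read off S[0]==S[-1].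
import Mathlib
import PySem

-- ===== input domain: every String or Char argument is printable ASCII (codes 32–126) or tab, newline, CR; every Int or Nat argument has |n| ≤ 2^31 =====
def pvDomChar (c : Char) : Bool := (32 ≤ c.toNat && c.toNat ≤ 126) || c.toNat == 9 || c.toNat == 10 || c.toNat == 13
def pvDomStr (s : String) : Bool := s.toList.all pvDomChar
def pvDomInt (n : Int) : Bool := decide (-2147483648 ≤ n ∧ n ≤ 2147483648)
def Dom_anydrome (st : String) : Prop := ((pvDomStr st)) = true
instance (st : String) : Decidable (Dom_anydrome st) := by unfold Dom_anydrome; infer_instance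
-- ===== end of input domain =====

-- B replaces A's single stateful loop (ascend/decend flags + seen-set duplicate counter) by a
-- sort-based classifier: compare the string with its sorted list and that list's reversal, and read
-- distinctness off strict adjacency in the sorted list. A raises IndexError on "" (excluded by Pre_).


-- ===== PORT A =====
-- the for-loop over range(1, len(st)) as structural recursion carrying prev = st[i-1]
-- and the same state (ascend, decend, dup, seen)
def anydromeLoop (prev : Char) (rest : List Char) (ascend decend : Bool) (dup : Int)
    (seen : PySem.Set Char) : Bool × Bool × Int × PySem.Set Char :=
  match rest with
  | [] => (ascend, decend, dup, seen)
  | c :: cs =>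
    let ascend := if prev < c then true else ascend
    let decend := if c < prev then true else decend
    let dup := if PySem.Set.contains seen c then dup + 1 else dup
    anydromeLoop c cs ascend decend dup (PySem.Set.add seen c)

def anydromeCore (cs : List Char) : Option String :=
  match cs with
  | [] => none   -- st[0] raises IndexError; excluded by Pre_anydrome
  | c0 :: rest =>
    let seen := PySem.Set.add PySem.Set.empty c0
    match anydromeLoop c0 rest false false 0 seen with
    | (ascend, decend, dup, _) =>
      if ascend && decend then some "Nondrome"
      else if dup = ((c0 :: rest).length : Int) - 1 then some "Repdrome"
      else if ascend && dup = 0 then some "Metadrome"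
      else if ascend && ¬ dup = 0 then some "Plaindrome"
      else if decend && dup = 0 then some "Katadrome"
      else if decend && ¬ dup = 0 then some "Nialpdrome"
      else none

def anydrome (st : String) : Option String := anydromeCore st.toList

-- ===== PORT B =====
-- sort once; S[0] / S[-1] via pyGet? (none = IndexError on ""); S[::-1] is List.reverse
-- (PySem.List.slice?_none_none_neg_one)
def anydromeAltCore (L : List Char) : Option String :=
  let S := PySem.List.sorted L (fun x => x) false
  match PySem.List.pyGet? S 0, PySem.List.pyGet? S (-1) with
  | some s0, some sl =>
    if s0 = sl then some "Repdrome"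
    else
      let nodup := (S.zip S.tail).all (fun p => p.1 < p.2)
      if L = S then some (if nodup then "Metadrome" else "Plaindrome")
      else if L = S.reverse then some (if nodup then "Katadrome" else "Nialpdrome")
      else some "Nondrome"
  | _, _ => none

def anydrome_alt (st : String) : Option String := anydromeAltCore st.toList

-- ===== PRECONDITION & SPEC =====
-- Pre_ excludes only the empty string, on which A raises IndexError (st[0]).
def Pre_anydrome (st : String) : Prop := PySem.Str.len st ≠ 0
instance (st : String) : Decidable (Pre_anydrome st) := by unfold Pre_anydrome; infer_instance
def pvWitness_anydrome : String := "abca"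

def Spec_anydrome (st : String) (out : Option String) : Prop := out = anydrome_alt st
instance (st : String) (out : Option String) : Decidable (Spec_anydrome st out) := by unfold Spec_anydrome; infer_instance

-- ===== CLAIM =====
def Claim_equal_anydrome : Prop := ∀ (st : String), Dom_anydrome st → Pre_anydrome st → Spec_anydrome st (anydrome st)

-- ===== LEMMAS AND PROOFS =====

-- A's whole loop at once: the flags become any-scans over adjacent pairs, dup counts the
-- elements of rest that did not enlarge the seen-set
theorem anydromeLoop_eq (rest : List Char) : ∀ (prev : Char) (asc dec : Bool) (dup : Int)
    (seen : PySem.Set Char),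
    anydromeLoop prev rest asc dec dup seen =
      (asc || ((prev :: rest).zip rest).any (fun p => p.1 < p.2),
       dec || ((prev :: rest).zip rest).any (fun p => p.2 < p.1),
       dup + (rest.length : Int) - (((PySem.Set.update seen rest).length : Int) - (seen.length : Int)),
       PySem.Set.update seen rest) := by
  induction rest with
  | nil => intro prev asc dec dup seen; simp [anydromeLoop, PySem.Set.update_nil]
  | cons c cs ih =>
    intro prev asc dec dup seen
    rw [anydromeLoop]
    simp only [ih, PySem.Set.update_cons]
    by_cases h : c ∈ seen
    · have hc : PySem.Set.contains seen c = true := (PySem.Set.contains_iff seen c).mpr h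
      have ha : PySem.Set.add seen c = seen := PySem.Set.add_of_mem h
      simp only [hc, if_pos, ha, List.zip_cons_cons, List.any_cons]
      refine congrArg₂ _ ?_ (congrArg₂ _ ?_ (congrArg₂ _ ?_ rfl))
      · cases asc <;> simp
      · cases dec <;> simp
      · simp only [List.length_cons]; push_cast; ring
    · have hc : PySem.Set.contains seen c = false := by
        simpa using h
      have ha : PySem.Set.add seen c = seen ++ [c] := PySem.Set.add_of_not_mem h
      simp only [hc, ha, List.zip_cons_cons, List.any_cons, Bool.false_eq_true]
      refine congrArg₂ _ ?_ (congrArg₂ _ ?_ (congrArg₂ _ ?_ rfl))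
      · cases asc <;> simp
      · cases dec <;> simp
      · simp only [List.length_append, List.length_cons, List.length_nil]; push_cast; ring

-- an adjacent-pair any-scan is the negation of a chain condition
theorem zipTail_any_eq_false (f : Char → Char → Bool) :
    ∀ (cs : List Char), (((cs.zip cs.tail).any (fun p => f p.1 p.2)) = false) ↔
      cs.IsChain (fun a b => f a b = false)
  | [] => by simp
  | [c] => by simp
  | c :: d :: ds => by
    have ih := zipTail_any_eq_false f (d :: ds)
    simp only [List.tail_cons, List.zip_cons_cons, List.any_cons, Bool.or_eq_false_iff] at *
    rw [List.isChain_cons_iff]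
    constructor
    · rintro ⟨h1, h2⟩; exact Or.inr ⟨d, ds, h1, ih.mp h2, rfl⟩
    · rintro (h | ⟨b, l', hfb, hch, heq⟩)
      · simp at h
      · cases heq; exact ⟨hfb, ih.mpr hch⟩

-- the dual, for the all-scan in B
theorem zipTail_all_eq_true (f : Char → Char → Bool) :
    ∀ (cs : List Char), (((cs.zip cs.tail).all (fun p => f p.1 p.2)) = true) ↔
      cs.IsChain (fun a b => f a b = true)
  | [] => by simp
  | [c] => by simp
  | c :: d :: ds => by
    have ih := zipTail_all_eq_true f (d :: ds)
    simp only [List.tail_cons, List.zip_cons_cons, List.all_cons, Bool.and_eq_true] at *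
    rw [List.isChain_cons_iff]
    constructor
    · rintro ⟨h1, h2⟩; exact Or.inr ⟨d, ds, h1, ih.mp h2, rfl⟩
    · rintro (h | ⟨b, l', hfb, hch, heq⟩)
      · simp at h
      · cases heq; exact ⟨hfb, ih.mpr hch⟩

-- no adjacent descent = globally nondecreasing
theorem no_desc_iff (cs : List Char) :
    (((cs.zip cs.tail).any (fun p => p.2 < p.1)) = false) ↔ cs.Pairwise (· ≤ ·) := by
  rw [zipTail_any_eq_false (fun a b => decide (b < a)) cs]
  rw [List.IsChain.iff (fun a b => by simp [not_lt] : ∀ a b : Char, (decide (b < a) = false) ↔ a ≤ b)]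
  exact List.isChain_iff_pairwise

-- no adjacent ascent = globally nonincreasing
theorem no_asc_iff (cs : List Char) :
    (((cs.zip cs.tail).any (fun p => p.1 < p.2)) = false) ↔ cs.Pairwise (fun a b => b ≤ a) := by
  rw [zipTail_any_eq_false (fun a b => decide (a < b)) cs]
  rw [List.IsChain.iff (fun a b => by simp [not_lt] : ∀ a b : Char, (decide (a < b) = false) ↔ b ≤ a)]
  letI : Trans (fun a b : Char => b ≤ a) (fun a b : Char => b ≤ a) (fun a b : Char => b ≤ a) :=
    ⟨fun h1 h2 => le_trans h2 h1⟩
  exact List.isChain_iff_pairwise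

-- set(xs) is a sublist of xs, so equal length forces equality
theorem ofList_sublist (xs : List Char) : (PySem.Set.ofList xs).Sublist xs := by
  induction xs using List.reverseRecOn with
  | nil => simp [PySem.Set.ofList_nil]
  | append_singleton ys y ih =>
    rw [PySem.Set.ofList_append_singleton, PySem.Set.add_eq_ite]
    split_ifs with h
    · exact ih.trans (List.sublist_append_left ys [y])
    · exact ih.append (List.Sublist.refl [y])

theorem distinct_eq_len_iff (xs : List Char) :
    (PySem.Set.ofList xs).length = xs.length ↔ xs.Nodup := by
  constructor
  · intro h
    have he := (ofList_sublist xs).eq_of_length h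
    rw [← he]; exact PySem.Set.nodup_ofList _
  · intro h; rw [PySem.Set.ofList_eq_self_of_nodup _ h]

theorem distinct_eq_one_iff (xs : List Char) (hne : xs ≠ []) :
    (PySem.Set.ofList xs).length = 1 ↔ ∀ x ∈ xs, ∀ y ∈ xs, x = y := by
  constructor
  · intro h x hx y hy
    rcases List.length_eq_one_iff.mp h with ⟨a, ha⟩
    have hxa : x = a := by
      have : x ∈ PySem.Set.ofList xs := (PySem.Set.mem_ofList _ _).mpr hx
      rw [ha] at this; simpa using this
    have hya : y = a := by
      have : y ∈ PySem.Set.ofList xs := (PySem.Set.mem_ofList _ _).mpr hy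
      rw [ha] at this; simpa using this
    rw [hxa, hya]
  · intro hall
    match hxs : xs, hne with
    | z :: zs, _ =>
      have hz : z ∈ PySem.Set.ofList (z :: zs) := (PySem.Set.mem_ofList _ _).mpr (by simp)
      have hnd : (PySem.Set.ofList (z :: zs)).Nodup := PySem.Set.nodup_ofList _
      match hs : PySem.Set.ofList (z :: zs) with
      | [] => rw [hs] at hz; simp at hz
      | [a] => rfl
      | a :: b :: u =>
        exfalso
        rw [hs] at hnd
        have ha : a ∈ z :: zs := (PySem.Set.mem_ofList _ _).mp (by rw [hs]; simp)
        have hb : b ∈ z :: zs := (PySem.Set.mem_ofList _ _).mp (by rw [hs]; simp)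
        have : a = b := hall a ha b hb
        simp [this] at hnd

-- all-members-equal propagates to any reflexive pairwise relation
theorem pairwise_of_all_eq (r : Char → Char → Prop) (hr : ∀ a : Char, r a a) (cs : List Char)
    (h : ∀ x ∈ cs, ∀ y ∈ cs, x = y) : cs.Pairwise r :=
  List.pairwise_of_forall_mem_list (fun a ha b hb => (h a ha b hb) ▸ hr a)

theorem all_eq_of_pairwise_both (cs : List Char)
    (h1 : cs.Pairwise (· ≤ ·)) (h2 : cs.Pairwise (fun a b : Char => b ≤ a)) :
    ∀ x ∈ cs, ∀ y ∈ cs, x = y := by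
  have heq : cs.Pairwise (· = ·) := (h1.and h2).imp (fun h => le_antisymm h.1 h.2)
  intro x hx y hy
  by_cases hxy : x = y
  · exact hxy
  · exact List.Pairwise.forall (fun _ _ h => h.symm) heq hx hy hxy

-- B's S[0] == S[-1] test says: all the characters are equal
theorem first_eq_last_iff (cs : List Char) (s0 : Char) (t : List Char)
    (hS : PySem.List.sorted cs (fun x => x) false = s0 :: t) :
    s0 = (s0 :: t).getLast (List.cons_ne_nil s0 t) ↔ ∀ x ∈ cs, ∀ y ∈ cs, x = y := by
  have hpair : (s0 :: t).Pairwise (· ≤ ·) := by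
    have h := PySem.List.sorted_pairwise (xs := cs) (key := fun x : Char => x)
    rw [hS] at h; exact h
  have hmem : ∀ x : Char, x ∈ s0 :: t ↔ x ∈ cs := by
    intro x
    rw [← hS]
    exact PySem.List.mem_sorted (xs := cs) (key := fun x : Char => x) (rev := false) (x := x)
  have hlast_mem : (s0 :: t).getLast (List.cons_ne_nil s0 t) ∈ s0 :: t := List.getLast_mem _
  constructor
  · intro heq x hx y hy
    have hle0 : ∀ z ∈ s0 :: t, s0 ≤ z := by
      intro z hz
      rcases List.mem_cons.mp hz with hz0 | hzt
      · rw [hz0]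
      · exact List.rel_of_pairwise_cons hpair hzt
    have hleL : ∀ z ∈ s0 :: t, z ≤ (s0 :: t).getLast (List.cons_ne_nil s0 t) := by
      have hrev : (s0 :: t).reverse.Pairwise (fun a b : Char => b ≤ a) :=
        List.pairwise_reverse.mpr hpair
      cases hrv : (s0 :: t).reverse with
      | nil => simp at hrv
      | cons a u =>
        have hal : a = (s0 :: t).getLast (List.cons_ne_nil s0 t) := by
          have h1 : (s0 :: t).reverse.head? = some a := by rw [hrv]; rfl
          rw [List.head?_reverse] at h1
          have h2 := List.getLast?_eq_getLast_of_ne_nil (List.cons_ne_nil s0 t)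
          rw [h1] at h2; exact Option.some_injective _ h2
        intro z hz
        have hz' : z ∈ (s0 :: t).reverse := (List.mem_reverse).mpr hz
        rw [hrv] at hz'
        rcases List.mem_cons.mp hz' with hz0 | hzu
        · rw [hz0, ← hal]
        · rw [← hal]
          rw [hrv] at hrev
          exact List.rel_of_pairwise_cons hrev hzu
    have hx' := (hmem x).mpr hx
    have hy' := (hmem y).mpr hy
    have hxs : x = s0 := le_antisymm (by rw [heq]; exact hleL x hx') (hle0 x hx')
    have hys : y = s0 := le_antisymm (by rw [heq]; exact hleL y hy') (hle0 y hy')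
    rw [hxs, hys]
  · intro hall
    exact hall s0 ((hmem s0).mp (by simp)) _ ((hmem _).mp hlast_mem)

-- B's strict-adjacency test on the sorted list says: the characters are pairwise distinct
theorem strict_adj_iff (cs : List Char) (S : List Char)
    (hS : PySem.List.sorted cs (fun x => x) false = S) :
    ((S.zip S.tail).all (fun p => p.1 < p.2)) = true ↔
      (PySem.Set.ofList cs).length = cs.length := by
  have hpair : S.Pairwise (· ≤ ·) := by
    have h := PySem.List.sorted_pairwise (xs := cs) (key := fun x : Char => x)
    rw [hS] at h; exact h
  have hperm : S.Perm cs := by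
    rw [← hS]; exact PySem.List.sorted_perm cs (fun x => x) false
  rw [zipTail_all_eq_true (fun a b => decide (a < b)) S]
  rw [List.IsChain.iff (fun a b => by simp : ∀ a b : Char, (decide (a < b) = true) ↔ a < b)]
  rw [List.isChain_iff_pairwise, distinct_eq_len_iff, ← hperm.nodup_iff]
  constructor
  · intro h; exact h.imp ne_of_lt
  · intro h; exact (hpair.and h).imp (fun hp => lt_of_le_of_ne hp.1 hp.2)

set_option maxHeartbeats 1000000 in
theorem core_eq (cs : List Char) (h : cs ≠ []) : anydromeCore cs = anydromeAltCore cs := by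
  match cs, h with
  | c0 :: rest, _ =>
    rw [anydromeCore, anydromeAltCore, anydromeLoop_eq]
    have hupd : PySem.Set.update (PySem.Set.add PySem.Set.empty c0) rest
        = PySem.Set.ofList (c0 :: rest) := by
      have h1 : PySem.Set.add PySem.Set.empty c0 = PySem.Set.ofList [c0] := rfl
      rw [h1, ← PySem.Set.ofList_append]; rfl
    cases hS : PySem.List.sorted (c0 :: rest) (fun x => x) false with
    | nil => exact absurd ((PySem.List.sorted_eq_nil_iff _ _ _).mp hS) (List.cons_ne_nil c0 rest)
    | cons s0 t =>
      have hget0 : PySem.List.pyGet? (s0 :: t) (0 : Int) = some s0 := by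
        simp [PySem.List.pyGet?, PySem.List.pyIdx?]
      have hgetm1 : PySem.List.pyGet? (s0 :: t) (-1 : Int)
          = some ((s0 :: t).getLast (List.cons_ne_nil s0 t)) := by
        have h := List.getLast?_eq_getLast_of_ne_nil (List.cons_ne_nil s0 t)
        rw [List.getLast?_eq_getElem?] at h
        simp only [PySem.List.pyGet?, PySem.List.pyIdx?]
        simp at h ⊢
        simpa using h
      simp only [hupd, hS, hget0, hgetm1, List.tail_cons, Bool.false_or]
      set sl := (s0 :: t).getLast (List.cons_ne_nil s0 t) with hsl
      -- the bridge facts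
      have haeq : s0 = sl ↔ ∀ x ∈ c0 :: rest, ∀ y ∈ c0 :: rest, x = y :=
        first_eq_last_iff (c0 :: rest) s0 t hS
      have hd1 : (PySem.Set.ofList (c0 :: rest)).length = 1 ↔
          ∀ x ∈ c0 :: rest, ∀ y ∈ c0 :: rest, x = y :=
        distinct_eq_one_iff (c0 :: rest) (List.cons_ne_nil c0 rest)
      have hdec : (((c0 :: rest).zip rest).any (fun p => p.2 < p.1)) = false ↔
          (c0 :: rest).Pairwise (· ≤ ·) := by
        have h := no_desc_iff (c0 :: rest); rw [List.tail_cons] at h; exact h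
      have hasc : (((c0 :: rest).zip rest).any (fun p => p.1 < p.2)) = false ↔
          (c0 :: rest).Pairwise (fun a b : Char => b ≤ a) := by
        have h := no_asc_iff (c0 :: rest); rw [List.tail_cons] at h; exact h
      have hle_iff : c0 :: rest = s0 :: t ↔ (c0 :: rest).Pairwise (· ≤ ·) := by
        constructor
        · intro he
          have h := PySem.List.sorted_pairwise (xs := c0 :: rest) (key := fun x : Char => x)
          rw [hS, ← he] at h; exact h
        · intro hp
          have h := PySem.List.sorted_eq_self_of_pairwise (c0 :: rest) (fun x : Char => x) hp
          rw [hS] at h; exact h.symm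
      have hrev_iff : c0 :: rest = (s0 :: t).reverse ↔
          (c0 :: rest).Pairwise (fun a b : Char => b ≤ a) := by
        constructor
        · intro he
          have hrv : (c0 :: rest).reverse = s0 :: t := by rw [he, List.reverse_reverse]
          have h := PySem.List.sorted_pairwise (xs := c0 :: rest) (key := fun x : Char => x)
          rw [hS, ← hrv] at h
          exact List.pairwise_reverse.mp h
        · intro hp
          have h2 : (c0 :: rest).reverse.Pairwise (· ≤ ·) := List.pairwise_reverse.mpr hp
          have h := PySem.List.sorted_id_eq_of_perm_of_pairwise _ _ ((c0 :: rest).reverse_perm) h2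
          rw [hS] at h
          rw [h, List.reverse_reverse]
      have hnodup : (((s0 :: t).zip t).all (fun p => p.1 < p.2)) = true ↔
          (PySem.Set.ofList (c0 :: rest)).length = (c0 :: rest).length := by
        have h := strict_adj_iff (c0 :: rest) (s0 :: t) hS
        rw [List.tail_cons] at h; exact h
      have hdle : (PySem.Set.ofList (c0 :: rest)).length ≤ rest.length + 1 := by
        have h := PySem.Set.length_ofList_le (c0 :: rest)
        simpa using h
      have hdpos : 1 ≤ (PySem.Set.ofList (c0 :: rest)).length := by
        have hz : c0 ∈ PySem.Set.ofList (c0 :: rest) := (PySem.Set.mem_ofList _ _).mpr (by simp)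
        cases hmm : PySem.Set.ofList (c0 :: rest) with
        | nil => rw [hmm] at hz; simp at hz
        | cons a u => simp
      have hseen1 : (PySem.Set.add PySem.Set.empty c0).length = 1 := rfl
      simp only [List.length_cons] at hnodup
      -- case analysis
      by_cases hAE : ∀ x ∈ c0 :: rest, ∀ y ∈ c0 :: rest, x = y
      · have hflip : (c0 :: rest).Pairwise (fun a b : Char => b ≤ a) :=
          pairwise_of_all_eq (fun a b : Char => b ≤ a) (fun a => le_refl a) _ hAE
        have hle : (c0 :: rest).Pairwise (· ≤ ·) :=
          pairwise_of_all_eq (fun a b : Char => a ≤ b) (fun a => le_refl a) _ hAE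
        have ha := hasc.mpr hflip
        have hd := hdec.mpr hle
        have h1 : (PySem.Set.ofList (c0 :: rest)).length = 1 := hd1.mpr hAE
        have hs0sl : s0 = sl := haeq.mpr hAE
        simp only [ha, hd, h1, hseen1, List.length_cons, Bool.false_and, Bool.and_false,
          Bool.true_and, Bool.and_true, Bool.and_self, Bool.false_eq_true, Bool.true_eq_false,
          decide_eq_true_eq, eq_self_iff_true, if_true, if_false]
        split_ifs <;> first | rfl | (exfalso; omega)
      · have hne1 : ¬ (PySem.Set.ofList (c0 :: rest)).length = 1 := fun hh => hAE (hd1.mp hh)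
        have hnsl : ¬ s0 = sl := fun hh => hAE (haeq.mp hh)
        by_cases hle : (c0 :: rest).Pairwise (· ≤ ·)
        · have hd := hdec.mpr hle
          have hflip_f : ¬ (c0 :: rest).Pairwise (fun a b : Char => b ≤ a) :=
            fun hf => hAE (all_eq_of_pairwise_both _ hle hf)
          have ha : (((c0 :: rest).zip rest).any (fun p => p.1 < p.2)) = true := by
            cases hcase : (((c0 :: rest).zip rest).any (fun p => p.1 < p.2))
            · exact absurd (hasc.mp hcase) hflip_f
            · rfl
          have hcsS : c0 :: rest = s0 :: t := hle_iff.mpr hle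
          by_cases hdn : (PySem.Set.ofList (c0 :: rest)).length = rest.length + 1
          · have hnd := hnodup.mpr hdn
            simp only [ha, hd, hnd, hseen1, List.length_cons, Bool.false_and, Bool.and_false,
              Bool.true_and, Bool.and_true, Bool.and_self, Bool.false_eq_true, Bool.true_eq_false,
              decide_eq_true_eq, eq_self_iff_true, if_true, if_false]
            split_ifs <;> first | rfl | (exfalso; omega)
          · have hnd : (((s0 :: t).zip t).all (fun p => p.1 < p.2)) = false := by
              cases hcase : (((s0 :: t).zip t).all (fun p => p.1 < p.2))
              · rfl
              · exact absurd (hnodup.mp hcase) hdn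
            simp only [ha, hd, hnd, hseen1, List.length_cons, Bool.false_and, Bool.and_false,
              Bool.true_and, Bool.and_true, Bool.and_self, Bool.false_eq_true, Bool.true_eq_false,
              decide_eq_true_eq, eq_self_iff_true, if_true, if_false]
            split_ifs <;> first | rfl | (exfalso; omega)
        · have hd : (((c0 :: rest).zip rest).any (fun p => p.2 < p.1)) = true := by
            cases hcase : (((c0 :: rest).zip rest).any (fun p => p.2 < p.1))
            · exact absurd (hdec.mp hcase) hle
            · rfl
          have hcsS_f : ¬ c0 :: rest = s0 :: t := fun hh => hle (hle_iff.mp hh)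
          by_cases hflip : (c0 :: rest).Pairwise (fun a b : Char => b ≤ a)
          · have ha := hasc.mpr hflip
            have hcsR : c0 :: rest = (s0 :: t).reverse := hrev_iff.mpr hflip
            by_cases hdn : (PySem.Set.ofList (c0 :: rest)).length = rest.length + 1
            · have hnd := hnodup.mpr hdn
              simp only [ha, hd, hnd, hseen1, List.length_cons, Bool.false_and,
                Bool.and_false, Bool.true_and, Bool.and_true, Bool.and_self, Bool.false_eq_true,
                Bool.true_eq_false, decide_eq_true_eq, eq_self_iff_true, if_true, if_false]
              split_ifs <;> first | rfl | (exfalso; omega)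
            · have hnd : (((s0 :: t).zip t).all (fun p => p.1 < p.2)) = false := by
                cases hcase : (((s0 :: t).zip t).all (fun p => p.1 < p.2))
                · rfl
                · exact absurd (hnodup.mp hcase) hdn
              simp only [ha, hd, hnd, hseen1, List.length_cons, Bool.false_and,
                Bool.and_false, Bool.true_and, Bool.and_true, Bool.and_self, Bool.false_eq_true,
                Bool.true_eq_false, decide_eq_true_eq, eq_self_iff_true, if_true, if_false]
              split_ifs <;> first | rfl | (exfalso; omega)
          · have ha : (((c0 :: rest).zip rest).any (fun p => p.1 < p.2)) = true := by
              cases hcase : (((c0 :: rest).zip rest).any (fun p => p.1 < p.2))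
              · exact absurd (hasc.mp hcase) hflip
              · rfl
            have hcsR_f : ¬ c0 :: rest = (s0 :: t).reverse := fun hh => hflip (hrev_iff.mp hh)
            simp only [ha, hd, hseen1, List.length_cons, Bool.false_and, Bool.true_and,
              Bool.and_self, decide_eq_true_eq, if_true]
            split_ifs <;> rfl

-- ===== VERDICT =====
theorem anydrome_spec : Claim_equal_anydrome := by
  intro st _ hpre
  unfold Pre_anydrome at hpre
  have hne : st.toList ≠ [] := by
    intro hnil
    apply hpre
    rw [PySem.Str.len_eq, hnil]
    rfl
  unfold Spec_anydrome anydrome anydrome_alt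
  exact core_eq st.toList hne
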